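-- pv_equiv track=rewrite | github.com/Muwu-Xu/cpra-python | cpra_pandas_chaoshen_unos.py | get_char_num_comb
-- ===== SOURCE A (Python) =====
-- def get_char_num_comb(arr,antigen_map):    #对于各种排列的情况，eg: AB, A:1,2. B:2,3.能有多少种排列组合. find out all combination of A1,2;B2,3.
-- 	char_num_comb = [[]]
-- 	for char in arr:
-- 		new_char_num_comb = []
-- 		num_list = antigen_map[char]
-- 		for num in num_list:
-- 			for char_num in char_num_comb:
-- 				new_char_num_comb.append(char_num+[[char,num]])
-- 		char_num_comb = new_char_num_comb
-- 	return char_num_comb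
-- ===== SOURCE B (Python) =====
-- def get_char_num_comb(arr, antigen_map):
--     # Simpler: materialise the per-char number lists once (arr order, so a missing
--     # key raises on the same char), then build combinations by recursion on the
--     # suffix, prepending the head pairs; nums vary fastest for each tail, which is
--     # exactly A's ordering.
--     lists = [antigen_map[c] for c in arr]
--
--     def build(i):
--         if i == len(arr):
--             return [[]]
--         rest = build(i + 1)
--         return [[[arr[i], num]] + tail for tail in rest for num in lists[i]]
--
--     return build(0)
-- ===== Notes on version B (the rewrite author's own statement) =====
-- stated objective: simpler
-- what changed: A grows combinations left-to-right with a triple nested loop over a mutated accumulator; B materialises the per-char number lists once and builds the result by recursion on the suffix, prepending head pairs to recursively built tails.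
import Mathlib
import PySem

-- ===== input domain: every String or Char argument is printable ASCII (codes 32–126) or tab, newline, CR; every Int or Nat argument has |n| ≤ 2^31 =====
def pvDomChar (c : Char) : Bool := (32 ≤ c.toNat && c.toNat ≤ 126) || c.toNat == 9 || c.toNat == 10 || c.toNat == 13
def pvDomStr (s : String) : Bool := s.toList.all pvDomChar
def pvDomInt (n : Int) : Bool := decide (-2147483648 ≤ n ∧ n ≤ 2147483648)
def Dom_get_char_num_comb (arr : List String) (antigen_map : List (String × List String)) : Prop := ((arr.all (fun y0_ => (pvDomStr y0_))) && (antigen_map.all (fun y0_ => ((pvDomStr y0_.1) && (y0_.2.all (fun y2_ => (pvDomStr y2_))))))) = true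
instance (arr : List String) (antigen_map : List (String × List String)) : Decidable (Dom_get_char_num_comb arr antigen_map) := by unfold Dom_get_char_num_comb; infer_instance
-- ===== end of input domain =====

-- B builds the combinations by recursion on the suffix (prepending head pairs) instead of A's
-- triple nested loop growing an accumulator left-to-right; objective: simpler.


-- ===== PORT A =====
-- inner two loops: for num in num_list: for char_num in char_num_comb: new.append(char_num + [[char, num]])
def pvAStep (char_num_comb : List (List (List String))) (char : String) (num_list : List String) : List (List (List String)) :=
  num_list.foldl (fun acc num =>
    char_num_comb.foldl (fun acc2 char_num => acc2 ++ [char_num ++ [[char, num]]]) acc) []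

-- the outer for-loop; none = KeyError on antigen_map[char]
def pvALoop (arr : List String) (d : PySem.Dict String (List String)) (char_num_comb : List (List (List String))) : Option (List (List (List String))) :=
  match arr with
  | [] => some char_num_comb
  | c :: cs =>
    match d.get? c with
    | none => none
    | some num_list => pvALoop cs d (pvAStep char_num_comb c num_list)

def get_char_num_comb (arr : List String) (antigen_map : List (String × List String)) : List (List (List String)) :=
  (pvALoop arr (PySem.Dict.ofList antigen_map) [[]]).getD []

-- ===== PORT B =====
-- build(i): combinations for the suffix; here as recursion on the zipped (char, nums) suffix
def pvBuild : List (String × List String) → List (List (List String))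
  | [] => [[]]
  | (c, l) :: rest => (pvBuild rest).flatMap (fun tail => l.map (fun num => [[c, num]] ++ tail))

def get_char_num_comb_alt (arr : List String) (antigen_map : List (String × List String)) : List (List (List String)) :=
  -- lists = [antigen_map[c] for c in arr]; none = KeyError (outside Pre_)
  match arr.mapM (fun c => (PySem.Dict.ofList antigen_map).get? c) with
  | none => []
  | some lists => pvBuild (arr.zip lists)

-- ===== PRECONDITION & SPEC =====
-- Pre_ excludes exactly the inputs where some char of arr is not a key of antigen_map: there A raises KeyError.
def Pre_get_char_num_comb (arr : List String) (antigen_map : List (String × List String)) : Prop :=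
  ∀ c ∈ arr, ((PySem.Dict.ofList antigen_map).get? c).isSome = true
instance (arr : List String) (antigen_map : List (String × List String)) : Decidable (Pre_get_char_num_comb arr antigen_map) := by unfold Pre_get_char_num_comb; infer_instance

def pvWitness_get_char_num_comb : List String × (List (String × List String)) :=
  (["A", "B"], [("A", ["1", "2"]), ("B", ["3"])])

def Spec_get_char_num_comb (arr : List String) (antigen_map : List (String × List String)) (out : List (List (List String))) : Prop := out = get_char_num_comb_alt arr antigen_map
instance (arr : List String) (antigen_map : List (String × List String)) (out : List (List (List String))) : Decidable (Spec_get_char_num_comb arr antigen_map out) := by unfold Spec_get_char_num_comb; infer_instance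

-- ===== CLAIM (what is proved, stated in full; the proofs are below) =====
def Claim_equal_get_char_num_comb : Prop := ∀ (arr : List String) (antigen_map : List (String × List String)), Dom_get_char_num_comb arr antigen_map → Pre_get_char_num_comb arr antigen_map → Spec_get_char_num_comb arr antigen_map (get_char_num_comb arr antigen_map)

-- ===== LEMMAS AND PROOFS =====

lemma pv_flatten_map_singleton {α β : Type} (f : α → β) (l : List α) :
    (l.map (fun a => [f a])).flatten = l.map f := by
  induction l with
  | nil => rfl
  | cons x xs ih => simp [ih]

lemma pvAStep_eq (comb : List (List (List String))) (c : String) (l : List String) :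
    pvAStep comb c l = l.flatMap (fun n => comb.map (· ++ [[c, n]])) := by
  unfold pvAStep
  simp only [PySem.List.foldl_append_eq_flatMap]
  simp [List.flatMap, pv_flatten_map_singleton]

lemma pvALoop_eq (d : PySem.Dict String (List String)) :
    ∀ (arr : List String) (ls : List (List String)) (comb : List (List (List String))),
      arr.mapM (fun c => d.get? c) = some ls →
      pvALoop arr d comb = some ((pvBuild (arr.zip ls)).flatMap (fun t => comb.map (· ++ t))) := by
  intro arr
  induction arr with
  | nil =>
    intro ls comb h
    simp only [List.mapM_nil] at h
    cases h
    simp [pvALoop, pvBuild]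
  | cons c cs ih =>
    intro ls comb h
    rw [List.mapM_cons] at h
    cases hc : d.get? c with
    | none => simp [hc] at h
    | some l =>
      rw [hc] at h
      cases hcs : cs.mapM (fun c => d.get? c) with
      | none => simp [hcs] at h
      | some ls' =>
        rw [hcs] at h
        have h' : some (l :: ls') = some ls := h
        cases h' 
        simp only [pvALoop, hc]
        rw [ih ls' (pvAStep comb c l) hcs, pvAStep_eq]
        simp [pvBuild, List.flatMap_assoc, List.map_flatMap, List.flatMap_map, List.map_map, Function.comp_def, List.append_assoc]

lemma pv_mapM_some (d : PySem.Dict String (List String)) (arr : List String)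
    (h : ∀ c ∈ arr, (d.get? c).isSome = true) :
    ∃ ls, arr.mapM (fun c => d.get? c) = some ls := by
  induction arr with
  | nil => exact ⟨[], rfl⟩
  | cons c cs ih =>
    obtain ⟨l, hl⟩ := Option.isSome_iff_exists.mp (h c (List.mem_cons_self))
    obtain ⟨ls, hls⟩ := ih (fun x hx => h x (List.mem_cons_of_mem _ hx))
    exact ⟨l :: ls, by simp [List.mapM_cons, hl, hls]⟩

-- ===== VERDICT (by name: the statement is the Claim_ definition above) =====
theorem get_char_num_comb_spec : Claim_equal_get_char_num_comb := by
  intro arr m _dom hpre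
  unfold Spec_get_char_num_comb get_char_num_comb get_char_num_comb_alt
  obtain ⟨ls, hls⟩ := pv_mapM_some _ arr hpre
  rw [hls, pvALoop_eq _ arr ls [[]] hls]
  simp
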